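-- pv_equiv track=rewrite | github.com/chance-hwa/study | algorithm/find_number_of_stable_protein.py | count_complex_ways_sort
-- ===== SOURCE A (Python) =====
-- def count_complex_ways_sort(thr: list) -> int:
--     n = len(thr)
--     thr = sorted(thr)
--     res = 0
--
--     # K = n (전부 포함): thr[i] < n 이므로 항상 가능
--     res += 1
--
--     for K in range(1, n):
--         if (thr[K-1] < K) and (K < thr[K]):
--             res += 1
--
--     return res
-- ===== SOURCE B (Python) =====
-- def count_complex_ways_sort(thr: list) -> int:
--     # No sort: a counting dict (one pass) plus a running "how many values < K" prefix count.
--     # K is valid iff exactly K elements are below K and no element equals K; K = n is always valid.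
--     n = len(thr)
--     counts = {}
--     for x in thr:
--         counts[x] = counts.get(x, 0) + 1
--     less = 0
--     for x in thr:
--         if x < 1:
--             less += 1
--     res = 1
--     for K in range(1, n):
--         if less == K and K not in counts:
--             res += 1
--         less += counts.get(K, 0)
--     return res
-- ===== Notes on version B (the rewrite author's own statement) =====
-- stated objective: alternative
-- what changed: Drops the sort: B builds a one-pass count dict and sweeps K with a running prefix count 'less', checking directly that exactly K elements are below K and none equals K, instead of A's sort-then-adjacent-window scan.
import Mathlib
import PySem

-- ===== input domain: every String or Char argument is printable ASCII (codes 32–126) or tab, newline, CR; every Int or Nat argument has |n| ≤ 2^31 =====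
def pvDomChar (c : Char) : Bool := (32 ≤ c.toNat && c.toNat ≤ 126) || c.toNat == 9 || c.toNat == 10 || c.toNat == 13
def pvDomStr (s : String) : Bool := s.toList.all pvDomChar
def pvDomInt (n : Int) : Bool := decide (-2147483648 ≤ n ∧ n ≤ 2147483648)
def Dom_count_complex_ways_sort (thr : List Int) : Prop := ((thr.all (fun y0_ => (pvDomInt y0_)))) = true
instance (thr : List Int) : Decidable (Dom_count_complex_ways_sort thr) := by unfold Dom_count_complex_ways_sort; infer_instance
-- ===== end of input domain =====

-- B replaces A's sort-then-adjacent-window scan with a sort-free counting pass (alternative decomposition, same result).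


-- ===== PORT A =====
def count_complex_ways_sort (thr : List Int) : Int :=
  let n : Int := thr.length
  let s := PySem.List.sorted thr id
  let res : Int := 0
  let res := res + 1
  (PySem.List.pyRange 1 n 1).foldl
    (fun res K =>
      if PySem.List.pyGetD s (K - 1) 0 < K ∧ K < PySem.List.pyGetD s K 0 then res + 1 else res)
    res

-- ===== PORT B =====
def count_complex_ways_sort_alt (thr : List Int) : Int :=
  let n : Int := thr.length
  let counts : PySem.Dict Int Int :=
    thr.foldl (fun d x => d.modify x 0 (· + 1)) PySem.Dict.empty
  let less : Int := thr.foldl (fun less x => if x < 1 then less + 1 else less) 0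
  let res : Int := 1
  let st := (PySem.List.pyRange 1 n 1).foldl
    (fun (st : Int × Int) K =>
      (if st.2 = K ∧ counts.contains K = false then st.1 + 1 else st.1,
       st.2 + counts.getD K 0))
    (res, less)
  st.1

-- ===== PRECONDITION & SPEC =====
def Spec_count_complex_ways_sort (thr : List Int) (out : Int) : Prop := out = count_complex_ways_sort_alt thr
instance (thr : List Int) (out : Int) : Decidable (Spec_count_complex_ways_sort thr out) := by unfold Spec_count_complex_ways_sort; infer_instance

-- ===== CLAIM (what is proved, stated in full; the proofs are below) =====
def Claim_equal_count_complex_ways_sort : Prop := ∀ (thr : List Int), Dom_count_complex_ways_sort thr → Spec_count_complex_ways_sort thr (count_complex_ways_sort thr)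

-- ===== LEMMAS AND PROOFS =====

-- On a ≤-sorted list, monotonicity of entries in the index.
theorem pv_sorted_mono (s : List Int) (hs : s.Pairwise (fun a b : Int => a ≤ b))
    {i j : Nat} (hij : i ≤ j) (hj : j < s.length) :
    s[i]'(lt_of_le_of_lt (by omega) hj) ≤ s[j] := by
  rcases Nat.lt_or_ge i j with h | h
  · exact List.pairwise_iff_getElem.1 hs i j _ hj h
  · have : i = j := by omega
    subst this; exact le_refl _

-- The heart of the equivalence: on a sorted list, the adjacent-window test at K
-- is the same as "exactly k elements are < k and k does not occur".
theorem pv_window_iff (s : List Int) (hs : s.Pairwise (fun a b : Int => a ≤ b))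
    (k : Nat) (hk0 : 0 < k) (hk : k < s.length) :
    (s[k-1]'(by omega) < (k : Int) ∧ (k : Int) < s[k]) ↔
      (s.countP (fun x => decide (x < (k : Int))) = k ∧ (k : Int) ∉ s) := by
  constructor
  · rintro ⟨h1, h2⟩
    have hlt : ∀ (i : Nat) (hi : i < s.length), i < k → s[i] < (k : Int) := by
      intro i hi hik
      have := pv_sorted_mono s hs (i := i) (j := k-1) (by omega) (by omega)
      omega
    have hge : ∀ (i : Nat) (hi : i < s.length), k ≤ i → (k : Int) < s[i] := by
      intro i hi hik
      have := pv_sorted_mono s hs (i := k) (j := i) hik hi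
      omega
    refine ⟨?_, ?_⟩
    · have hsplit : s.countP (fun x => decide (x < (k : Int))) =
          (s.take k).countP (fun x => decide (x < (k : Int))) +
          (s.drop k).countP (fun x => decide (x < (k : Int))) := by
        rw [← List.countP_append, List.take_append_drop]
      have htake : (s.take k).countP (fun x => decide (x < (k : Int))) = (s.take k).length := by
        rw [List.countP_eq_length]
        intro a ha
        obtain ⟨i, hi, rfl⟩ := List.mem_iff_getElem.1 ha
        rw [List.getElem_take]
        have hik : i < k := by
          have := List.length_take (l := s) (i := k); omega
        simp only [decide_eq_true_eq]
        exact hlt i (by omega) hik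
      have hdrop : (s.drop k).countP (fun x => decide (x < (k : Int))) = 0 := by
        rw [List.countP_eq_zero]
        intro a ha
        obtain ⟨j, hj, rfl⟩ := List.mem_iff_getElem.1 ha
        rw [List.getElem_drop]
        simp only [decide_eq_true_eq, not_lt]
        have := hge (k + j) (by have := List.length_drop (l := s) (i := k); omega) (by omega)
        omega
      have hlen : (s.take k).length = k := by
        have := List.length_take (l := s) (i := k); omega
      omega
    · intro hm
      obtain ⟨i, hi, hgi⟩ := List.mem_iff_getElem.1 hm
      rcases Nat.lt_or_ge i k with h | h
      · have := hlt i hi h; omega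
      · have := hge i hi h; omega
  · rintro ⟨hc, hm⟩
    have hne : ∀ (i : Nat) (hi : i < s.length), s[i] ≠ (k : Int) := by
      intro i hi he
      exact hm (he ▸ List.getElem_mem hi)
    constructor
    · by_contra h
      push Not at h
      have hgt : (k : Int) < s[k-1]'(by omega) := by
        have := hne (k-1) (by omega); omega
      have hdrop : (s.drop (k-1)).countP (fun x => decide (x < (k : Int))) = 0 := by
        rw [List.countP_eq_zero]
        intro a ha
        obtain ⟨j, hj, rfl⟩ := List.mem_iff_getElem.1 ha
        rw [List.getElem_drop]
        simp only [decide_eq_true_eq, not_lt]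
        have := pv_sorted_mono s hs (i := k-1) (j := (k-1) + j) (by omega)
          (by have := List.length_drop (l := s) (i := k-1); omega)
        omega
      have hsplit : s.countP (fun x => decide (x < (k : Int))) =
          (s.take (k-1)).countP (fun x => decide (x < (k : Int))) +
          (s.drop (k-1)).countP (fun x => decide (x < (k : Int))) := by
        rw [← List.countP_append, List.take_append_drop]
      have hle : (s.take (k-1)).countP (fun x => decide (x < (k : Int))) ≤ (s.take (k-1)).length :=
        List.countP_le_length
      have hlen : (s.take (k-1)).length ≤ k - 1 := by
        have := List.length_take (l := s) (i := k-1); omega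
      omega
    · by_contra h
      push Not at h
      have hlt : s[k] < (k : Int) := by
        have := hne k hk; omega
      have htake : (s.take (k+1)).countP (fun x => decide (x < (k : Int))) = (s.take (k+1)).length := by
        rw [List.countP_eq_length]
        intro a ha
        obtain ⟨i, hi, rfl⟩ := List.mem_iff_getElem.1 ha
        rw [List.getElem_take]
        have hik : i < k + 1 := by
          have := List.length_take (l := s) (i := k+1); omega
        simp only [decide_eq_true_eq]
        have := pv_sorted_mono s hs (i := i) (j := k) (by omega) hk
        omega
      have hlen : (s.take (k+1)).length = k + 1 := by
        have := List.length_take (l := s) (i := k+1); omega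
      have hsplit : s.countP (fun x => decide (x < (k : Int))) =
          (s.take (k+1)).countP (fun x => decide (x < (k : Int))) +
          (s.drop (k+1)).countP (fun x => decide (x < (k : Int))) := by
        rw [← List.countP_append, List.take_append_drop]
      omega

-- countP (< a+1) splits into countP (< a) plus the multiplicity of a.
theorem pv_count_succ (thr : List Int) (a : Int) :
    thr.countP (fun x => decide (x < a + 1)) =
      thr.countP (fun x => decide (x < a)) + thr.count a := by
  induction thr with
  | nil => simp
  | cons y ys ih =>
    simp only [List.countP_cons, List.count_cons, ih, decide_eq_true_eq, beq_iff_eq]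
    split_ifs <;> omega

-- B's first scan is countP (< a).
theorem pv_less_init (thr : List Int) (a : Int) : ∀ acc : Int,
    thr.foldl (fun acc x => if x < a then acc + 1 else acc) acc
      = acc + (thr.countP (fun x => decide (x < a)) : Int) := by
  induction thr with
  | nil => intro acc; simp
  | cons y ys ih =>
    intro acc
    by_cases h : y < a
    · simp only [List.foldl_cons, List.countP_cons, h, decide_true, if_true, ih]
      push_cast
      ring
    · simp [List.foldl_cons, h, ih]

-- B's main loop, carrying "less = countP (< a)" as the invariant, computes the
-- same result as the direct fold on the condition "countP (< K) = K and K absent".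
theorem pv_loop (thr : List Int) (b : Int) :
    ∀ (m : Nat) (a res : Int), (b - a).toNat = m →
    ((PySem.List.pyRange a b 1).foldl
        (fun (st : Int × Int) K =>
          (if st.2 = K ∧ (PySem.Dict.counter thr).contains K = false then st.1 + 1 else st.1,
           st.2 + (PySem.Dict.counter thr).getD K 0))
        (res, (thr.countP (fun x => decide (x < a)) : Int))).1
      = (PySem.List.pyRange a b 1).foldl
          (fun res K =>
            if (thr.countP (fun x => decide (x < K)) : Int) = K ∧ thr.contains K = false
            then res + 1 else res)
          res := by
  intro m
  induction m with
  | zero =>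
    intro a res h
    rw [PySem.List.pyRange_one_eq_nil (by omega)]
    rfl
  | succ m ih =>
    intro a res h
    have hab : a < b := by omega
    rw [PySem.List.pyRange_one_cons hab]
    simp only [List.foldl_cons]
    rw [PySem.Dict.getD_counter, PySem.Dict.contains_counter]
    have hc : (thr.countP (fun x => decide (x < a)) : Int) + (thr.count a : Int)
        = (thr.countP (fun x => decide (x < a + 1)) : Int) := by
      rw [pv_count_succ]; push_cast; ring
    rw [hc]
    exact ih (a + 1) _ (by omega)

theorem pv_ab_eq (thr : List Int) :
    count_complex_ways_sort thr = count_complex_ways_sort_alt thr := by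
  have hA : count_complex_ways_sort thr =
      (PySem.List.pyRange 1 (thr.length : Int) 1).foldl
        (fun res K =>
          if (thr.countP (fun x => decide (x < K)) : Int) = K ∧ thr.contains K = false
          then res + 1 else res)
        1 := by
    unfold count_complex_ways_sort
    simp only
    apply PySem.List.foldl_congr_mem'
    intro K hK acc
    obtain ⟨hK1, hKn⟩ := PySem.List.mem_pyRange_one.1 hK
    set s := PySem.List.sorted thr id with hsdef
    have hlen : s.length = thr.length := PySem.List.length_sorted thr id false
    have hperm : s.Perm thr := PySem.List.sorted_perm thr id false
    have hpair : s.Pairwise (fun a b : Int => a ≤ b) := PySem.List.sorted_pairwise thr id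
    set k : Nat := K.toNat with hkdef
    have hKk : (k : Int) = K := Int.toNat_of_nonneg (by omega)
    have hk0 : 0 < k := by omega
    have hks : k < s.length := by omega
    have hg1 : PySem.List.pyGetD s (K - 1) 0 = s[k-1]'(by omega) := by
      rw [PySem.List.pyGetD_eq_getElem s 0 (by omega) (by omega)]
      congr 1
      omega
    have hg2 : PySem.List.pyGetD s K 0 = s[k] := by
      rw [PySem.List.pyGetD_eq_getElem s 0 (by omega) (by omega)]
    have hcount : thr.countP (fun x => decide (x < K)) =
        s.countP (fun x => decide (x < K)) :=
      (hperm.countP_eq _).symm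
    have hmem : (thr.contains K = false) ↔ K ∉ s := by
      simp [hperm.mem_iff]
    refine if_congr ?_ rfl rfl
    rw [hg1, hg2]
    have hw := pv_window_iff s hpair k hk0 hks
    rw [hKk] at hw
    rw [hw, hmem, hcount]
    constructor
    · rintro ⟨hc, hm⟩
      exact ⟨by omega, hm⟩
    · rintro ⟨hc, hm⟩
      exact ⟨by omega, hm⟩
  have hB : count_complex_ways_sort_alt thr =
      (PySem.List.pyRange 1 (thr.length : Int) 1).foldl
        (fun res K =>
          if (thr.countP (fun x => decide (x < K)) : Int) = K ∧ thr.contains K = false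
          then res + 1 else res)
        1 := by
    unfold count_complex_ways_sort_alt
    simp only
    rw [← PySem.Dict.counter_eq_foldl, pv_less_init, zero_add]
    exact pv_loop thr (thr.length : Int) ((thr.length : Int) - 1).toNat 1 1 rfl
  rw [hA, hB]

-- ===== VERDICT (by name: the statement is the Claim_ definition above) =====
theorem count_complex_ways_sort_spec : Claim_equal_count_complex_ways_sort := by
  intro thr _
  unfold Spec_count_complex_ways_sort
  exact pv_ab_eq thr
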